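-- pv_equiv track=rewrite | github.com/BlockWorksCo/Playground | FusEd/Span.py | OrderedInsert
-- ===== SOURCE A (Python) =====
-- def OrderedInsert(spans, span):
--
--     if spans == []:
--         newSpans    = [span]
--
--     else:
--         newSpans    = []
--         s,e,t0      = span
--         inserted    = False
--         for tS,tE,t1 in spans:
--
--             if e == tS and inserted == False:
--                 newSpans.append(span)
--                 inserted    = True
--
--             newSpans.append( (tS,tE,t1) )
--
--             if tE == s and inserted == False:
--                 newSpans.append(span)
--                 inserted    = True
--
--     return newSpans
-- ===== SOURCE B (Python) =====
-- def OrderedInsert(spans, span):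
--     if spans == []:
--         return [span]
--     lst = list(spans)
--     s, e, t0 = span
--     # two staged passes: collect ALL indices whose start matches e and ALL whose end matches s
--     before = [j for j, t in enumerate(lst) if t[0] == e]
--     after = [j for j, t in enumerate(lst) if t[1] == s]
--     b = before[0] if before else None
--     a = after[0] if after else None
--     if b is None and a is None:
--         return lst
--     if a is None or (b is not None and b <= a):
--         pos = b
--     else:
--         pos = a + 1
--     return lst[:pos] + [span] + lst[pos:]
-- ===== Notes on version B (the rewrite author's own statement) =====
-- stated objective: alternative
-- what changed: A rebuilds the list element by element threading an 'inserted' flag with two in-loop checks; B instead runs two independent comprehension passes collecting ALL start-matching and ALL end-matching indices, combines their first elements arithmetically (b if b<=a else a+1) into one insertion position, and splices with a single slice-concatenation.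
import Mathlib
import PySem

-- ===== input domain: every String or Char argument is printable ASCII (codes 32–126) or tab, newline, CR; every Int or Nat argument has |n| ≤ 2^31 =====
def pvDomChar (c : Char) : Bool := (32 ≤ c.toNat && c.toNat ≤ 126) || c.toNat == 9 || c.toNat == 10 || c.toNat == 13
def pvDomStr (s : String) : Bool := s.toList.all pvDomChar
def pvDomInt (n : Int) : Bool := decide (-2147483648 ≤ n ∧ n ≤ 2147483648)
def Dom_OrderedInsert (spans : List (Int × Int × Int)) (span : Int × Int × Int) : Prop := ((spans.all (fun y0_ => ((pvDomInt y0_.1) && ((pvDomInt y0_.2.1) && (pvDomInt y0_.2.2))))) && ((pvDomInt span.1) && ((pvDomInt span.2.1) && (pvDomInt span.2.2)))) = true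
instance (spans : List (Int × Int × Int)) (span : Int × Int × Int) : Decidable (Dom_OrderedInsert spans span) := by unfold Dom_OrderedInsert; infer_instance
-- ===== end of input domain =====

-- B replaces A's flag-threading rebuild loop by two comprehension passes over all matching
-- indices, an arithmetic combination of their first elements, and one slice splice.

-- ===== PORT A =====
-- one iteration of A's for-loop: state = (newSpans, inserted); span = (s, e, t0), t = (tS, tE, t1)
def pvStepA (span : Int × Int × Int) (acc : List (Int × Int × Int) × Bool) (t : Int × Int × Int) :
    List (Int × Int × Int) × Bool :=
  let ns1  := if span.2.1 = t.1 ∧ acc.2 = false then acc.1 ++ [span] else acc.1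
  let ins1 := if span.2.1 = t.1 ∧ acc.2 = false then true else acc.2
  let ns2  := ns1 ++ [t]
  let ns3  := if t.2.1 = span.1 ∧ ins1 = false then ns2 ++ [span] else ns2
  let ins3 := if t.2.1 = span.1 ∧ ins1 = false then true else ins1
  (ns3, ins3)

def OrderedInsert (spans : List (Int × Int × Int)) (span : Int × Int × Int) : List (Int × Int × Int) :=
  if spans = [] then [span]
  else (spans.foldl (pvStepA span) ([], false)).1

-- ===== PORT B =====
-- B's first comprehension: [j for j, t in enumerate(lst) if t[0] == e]
def pvBefore (e : Int) (lst : List (Int × Int × Int)) : List Int :=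
  (PySem.List.enumerate lst).filterMap (fun p => if p.2.1 = e then some p.1 else none)

-- B's second comprehension: [j for j, t in enumerate(lst) if t[1] == s]
def pvAfter (s : Int) (lst : List (Int × Int × Int)) : List Int :=
  (PySem.List.enumerate lst).filterMap (fun p => if p.2.2.1 = s then some p.1 else none)

def OrderedInsert_alt (spans : List (Int × Int × Int)) (span : Int × Int × Int) : List (Int × Int × Int) :=
  if spans = [] then [span]
  else
    let b := (pvBefore span.2.1 spans).head?   -- before[0] if before else None
    let a := (pvAfter span.1 spans).head?      -- after[0] if after else None
    if b = none ∧ a = none then spans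
    else
      let pos : Int :=
        if a = none ∨ (b ≠ none ∧ b.getD 0 ≤ a.getD 0) then b.getD 0 else a.getD 0 + 1
      PySem.List.slice spans none (some pos) ++ [span] ++ PySem.List.slice spans (some pos) none

-- ===== PRECONDITION & SPEC =====
def Spec_OrderedInsert (spans : List (Int × Int × Int)) (span : Int × Int × Int) (out : List (Int × Int × Int)) : Prop := out = OrderedInsert_alt spans span
instance (spans : List (Int × Int × Int)) (span : Int × Int × Int) (out : List (Int × Int × Int)) : Decidable (Spec_OrderedInsert spans span out) := by unfold Spec_OrderedInsert; infer_instance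

-- ===== CLAIM (what is proved, stated in full; the proofs are below) =====
def Claim_equal_OrderedInsert : Prop := ∀ (spans : List (Int × Int × Int)) (span : Int × Int × Int), Dom_OrderedInsert spans span → Spec_OrderedInsert spans span (OrderedInsert spans span)

-- ===== LEMMAS AND PROOFS =====

-- proof-side characterisation of the common insertion position
def pvFindPos (s e : Int) : List (Int × Int × Int) → Option Nat
  | [] => none
  | t :: rest =>
    if e = t.1 then some 0
    else if t.2.1 = s then some 1
    else (pvFindPos s e rest).map (· + 1)

def pvFirstB (e : Int) : List (Int × Int × Int) → Option Nat
  | [] => none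
  | t :: rest => if t.1 = e then some 0 else (pvFirstB e rest).map (· + 1)

def pvFirstA (s : Int) : List (Int × Int × Int) → Option Nat
  | [] => none
  | t :: rest => if t.2.1 = s then some 0 else (pvFirstA s rest).map (· + 1)

-- once inserted = true, the rest of A's loop only appends the remaining elements
theorem pvLoopA_true (span : Int × Int × Int) :
    ∀ (spans : List (Int × Int × Int)) (acc : List (Int × Int × Int)),
      spans.foldl (pvStepA span) (acc, true) = (acc ++ spans, true) := by
  intro spans
  induction spans with
  | nil => intro acc; simp
  | cons t rest ih =>
    intro acc
    simp only [List.foldl_cons, pvStepA]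
    simp [ih]

-- A's loop from inserted = false computes the splice at pvFindPos
theorem pvLoopA_false (span : Int × Int × Int) :
    ∀ (spans : List (Int × Int × Int)) (acc : List (Int × Int × Int)),
      (spans.foldl (pvStepA span) (acc, false)).1 =
        match pvFindPos span.1 span.2.1 spans with
        | some p => acc ++ spans.take p ++ [span] ++ spans.drop p
        | none => acc ++ spans := by
  intro spans
  induction spans with
  | nil => intro acc; simp [pvFindPos]
  | cons t rest ih =>
    intro acc
    by_cases h1 : span.2.1 = t.1
    · simp only [List.foldl_cons, pvStepA, h1]
      simp [pvLoopA_true, pvFindPos]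
    · by_cases h2 : t.2.1 = span.1
      · simp only [List.foldl_cons, pvStepA, h1, h2]
        simp [pvLoopA_true, pvFindPos, h1, h2]
      · have hstep : (t :: rest).foldl (pvStepA span) (acc, false)
            = rest.foldl (pvStepA span) (acc ++ [t], false) := by
          simp [pvStepA, h1, h2]
        rw [hstep, ih (acc ++ [t])]
        simp only [pvFindPos, if_neg h1, if_neg h2]
        cases pvFindPos span.1 span.2.1 rest with
        | none => simp
        | some p => simp

-- head of B's first comprehension = pvFirstB, shifted by the enumerate start
theorem pvBefore_head (e : Int) :
    ∀ (lst : List (Int × Int × Int)) (n : Int),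
      ((PySem.List.enumerate lst n).filterMap
        (fun p => if p.2.1 = e then some p.1 else none)).head? =
      (pvFirstB e lst).map (fun k => n + (k : Int)) := by
  intro lst
  induction lst with
  | nil => intro n; simp [PySem.List.enumerate_nil, pvFirstB]
  | cons t rest ih =>
    intro n
    rw [PySem.List.enumerate_cons]
    by_cases h : t.1 = e
    · simp [pvFirstB, h]
    · simp only [List.filterMap_cons, if_neg h, pvFirstB]
      rw [ih (n + 1)]
      cases pvFirstB e rest with
      | none => simp
      | some k => simp; ring

theorem pvAfter_head (s : Int) :
    ∀ (lst : List (Int × Int × Int)) (n : Int),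
      ((PySem.List.enumerate lst n).filterMap
        (fun p => if p.2.2.1 = s then some p.1 else none)).head? =
      (pvFirstA s lst).map (fun k => n + (k : Int)) := by
  intro lst
  induction lst with
  | nil => intro n; simp [PySem.List.enumerate_nil, pvFirstA]
  | cons t rest ih =>
    intro n
    rw [PySem.List.enumerate_cons]
    by_cases h : t.2.1 = s
    · simp [pvFirstA, h]
    · simp only [List.filterMap_cons, if_neg h, pvFirstA]
      rw [ih (n + 1)]
      cases pvFirstA s rest with
      | none => simp
      | some k => simp; ring

-- combining the two first matches gives pvFindPos
theorem pvCombine (s e : Int) :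
    ∀ (lst : List (Int × Int × Int)),
      pvFindPos s e lst =
        match pvFirstB e lst, pvFirstA s lst with
        | none, none => none
        | some b, none => some b
        | none, some a => some (a + 1)
        | some b, some a => if b ≤ a then some b else some (a + 1) := by
  intro lst
  induction lst with
  | nil => simp [pvFindPos, pvFirstB, pvFirstA]
  | cons t rest ih =>
    by_cases h1 : e = t.1
    · have h1' : t.1 = e := h1.symm
      simp only [pvFindPos, pvFirstB, if_pos h1, if_pos h1']
      cases h : pvFirstA s (t :: rest) with
      | none => simp
      | some a => simp
    · have h1' : ¬ t.1 = e := fun h => h1 h.symm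
      by_cases h2 : t.2.1 = s
      · simp only [pvFindPos, pvFirstB, pvFirstA, if_neg h1, if_neg h1', if_pos h2]
        cases pvFirstB e rest with
        | none => simp
        | some b => simp
      · simp only [pvFindPos, pvFirstB, pvFirstA, if_neg h1, if_neg h1', if_neg h2, ih]
        cases hb : pvFirstB e rest with
        | none =>
          cases ha : pvFirstA s rest with
          | none => simp
          | some a => simp
        | some b =>
          cases ha : pvFirstA s rest with
          | none => simp
          | some a =>
            by_cases hba : b ≤ a
            · simp [hba]
            · simp [hba]

-- B's port computes the splice at pvFindPos on nonempty input
theorem pvAlt_eq (spans : List (Int × Int × Int)) (span : Int × Int × Int)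
    (hnil : spans ≠ []) :
    OrderedInsert_alt spans span =
      match pvFindPos span.1 span.2.1 spans with
      | some p => spans.take p ++ [span] ++ spans.drop p
      | none => spans := by
  unfold OrderedInsert_alt pvBefore pvAfter
  rw [pvBefore_head, pvAfter_head, pvCombine]
  cases hb : pvFirstB span.2.1 spans <;> cases ha : pvFirstA span.1 spans
  case none.none => simp [hnil]
  case none.some a =>
    simp [hnil]
    rw [show ((a:Int) + 1) = (((a + 1 : Nat)):Int) by push_cast; ring,
        PySem.List.slice_to_natCast, PySem.List.slice_from_natCast]
  case some.none b =>
    simp [hnil]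
  case some.some b a =>
    by_cases hba : b ≤ a
    · have hba' : ((b:Int)) ≤ ((a:Int)) := by exact_mod_cast hba
      simp [hnil, hba, hba']
    · have hba' : ¬ ((b:Int)) ≤ ((a:Int)) := by exact_mod_cast hba
      simp [hnil, hba, hba']
      rw [show ((a:Int) + 1) = (((a + 1 : Nat)):Int) by push_cast; ring,
          PySem.List.slice_to_natCast, PySem.List.slice_from_natCast]

-- ===== VERDICT (by name: the statement is the Claim_ definition above) =====
theorem OrderedInsert_spec : Claim_equal_OrderedInsert := by
  intro spans span _
  unfold Spec_OrderedInsert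
  by_cases hnil : spans = []
  · simp [hnil, OrderedInsert, OrderedInsert_alt]
  · rw [pvAlt_eq spans span hnil]
    unfold OrderedInsert
    simp only [if_neg hnil]
    rw [pvLoopA_false]
    cases pvFindPos span.1 span.2.1 spans with
    | none => simp
    | some p => simp
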